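-- pv_equiv track=rewrite | github.com/huangjoseph45/leetcode | circles.py | sorter
-- ===== SOURCE A (Python) =====
-- def sorter(num):
--     ref = {"0":1, "4":1, "6":1, "8":2, "9":1}
--
--     zeroes = 0
--     while len(num) > 0:
--         if num[-1] in ref:
--             zeroes += ref[num[-1]]
--         num = num[0:-1]
--     return zeroes
-- ===== SOURCE B (Python) =====
-- def sorter(num):
--     counts = {}
--     for c in num:
--         counts[c] = counts.get(c, 0) + 1
--     total = 0
--     for d, w in [("0", 1), ("4", 1), ("6", 1), ("8", 2), ("9", 1)]:
--         total += counts.get(d, 0) * w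
--     return total
-- ===== Notes on version B (the rewrite author's own statement) =====
-- stated objective: faster
-- what changed: B builds a character-frequency dict in one pass and then loops over the fixed 5-entry weight table accumulating count*weight, instead of A's repeated slicing num = num[0:-1] that copies the string each iteration.
import Mathlib
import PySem

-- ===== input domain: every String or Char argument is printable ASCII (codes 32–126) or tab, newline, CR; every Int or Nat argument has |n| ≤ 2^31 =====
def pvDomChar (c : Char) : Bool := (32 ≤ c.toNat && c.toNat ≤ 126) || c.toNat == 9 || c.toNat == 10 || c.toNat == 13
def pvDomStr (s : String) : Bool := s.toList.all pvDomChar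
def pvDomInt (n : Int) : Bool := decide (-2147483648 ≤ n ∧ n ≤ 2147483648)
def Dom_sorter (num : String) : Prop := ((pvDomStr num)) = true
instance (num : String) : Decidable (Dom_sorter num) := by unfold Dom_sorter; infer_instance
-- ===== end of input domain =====

-- B is faster: it counts characters once and folds over the fixed 5-entry weight table,
-- instead of A's repeated num[0:-1] slicing (a fresh copy per iteration).

-- ===== PORT A =====
-- ref = {"0":1, "4":1, "6":1, "8":2, "9":1}
def sorterRef : PySem.Dict Char Int :=
  ((((PySem.Dict.empty.insert '0' 1).insert '4' 1).insert '6' 1).insert '8' 2).insert '9' 1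

-- the while loop: checks num[-1], adds ref[num[-1]] when present, then num = num[0:-1]
def sorterLoop (num : List Char) (zeroes : Int) : Int :=
  if h : num.length > 0 then
    let z := match sorterRef.get? (PySem.List.pyGetD num (-1) ' ') with
      | some w => zeroes + w
      | none => zeroes
    sorterLoop (PySem.List.slice num (some 0) (some (-1))) z
  else zeroes
termination_by num.length
decreasing_by
  simp [PySem.List.slice_zero_start, PySem.List.slice_to_neg_one]
  cases num with
  | nil => simp at h
  | cons a l => simp

def sorter (num : String) : Int := sorterLoop num.toList 0

-- ===== PORT B =====
def sorterTable : List (Char × Int) := [('0', 1), ('4', 1), ('6', 1), ('8', 2), ('9', 1)]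

def sorter_alt (num : String) : Int :=
  let counts : PySem.Dict Char Int :=
    num.toList.foldl (fun d c => d.insert c (d.getD c 0 + 1)) PySem.Dict.empty
  sorterTable.foldl (fun total p => total + counts.getD p.1 0 * p.2) 0

-- ===== PRECONDITION & SPEC =====
def Spec_sorter (num : String) (out : Int) : Prop := out = sorter_alt num
instance (num : String) (out : Int) : Decidable (Spec_sorter num out) := by unfold Spec_sorter; infer_instance

-- ===== CLAIM (what is proved, stated in full; the proofs are below) =====
def Claim_equal_sorter : Prop := ∀ (num : String), Dom_sorter num → Spec_sorter num (sorter num)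

-- ===== LEMMAS AND PROOFS =====

-- weight of one character, as A's dict lookup reads it
def pvWeight (c : Char) : Int :=
  match sorterRef.get? c with
  | some w => w
  | none => 0

theorem sorterLoop_eq (l : List Char) (z : Int) :
    sorterLoop l z = z + (l.map pvWeight).sum := by
  induction l using List.reverseRecOn generalizing z with
  | nil => simp [sorterLoop]
  | append_singleton xs a ih =>
    rw [sorterLoop]
    simp only [List.length_append, List.length_singleton]
    rw [dif_pos (by omega)]
    rw [PySem.List.pyGetD_neg_one_append_singleton]
    simp only [PySem.List.slice_zero_start, PySem.List.slice_to_neg_one,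
      List.dropLast_concat]
    rw [ih]
    simp only [List.map_append, List.map_singleton, List.sum_append,
      List.sum_cons, List.sum_nil, pvWeight]
    cases sorterRef.get? a
    · ring
    · ring

theorem weight_sum_eq (l : List Char) :
    (l.map pvWeight).sum =
      (l.count '0' : Int) * 1 + (l.count '4' : Int) * 1 + (l.count '6' : Int) * 1 +
      (l.count '8' : Int) * 2 + (l.count '9' : Int) * 1 := by
  induction l with
  | nil => simp
  | cons c t ih =>
    simp only [List.map_cons, List.sum_cons, List.count_cons, ih]
    by_cases h0 : c = '0'
    · subst h0
      have hw : pvWeight '0' = 1 := by decide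
      simp [hw]; ring
    · by_cases h4 : c = '4'
      · subst h4
        have hw : pvWeight '4' = 1 := by decide
        simp [hw]; ring
      · by_cases h6 : c = '6'
        · subst h6
          have hw : pvWeight '6' = 1 := by decide
          simp [hw]; ring
        · by_cases h8 : c = '8'
          · subst h8
            have hw : pvWeight '8' = 2 := by decide
            simp [hw]; ring
          · by_cases h9 : c = '9'
            · subst h9
              have hw : pvWeight '9' = 1 := by decide
              simp [hw]; ring
            · have hnone : sorterRef.get? c = none := by
                have h : sorterRef = PySem.Dict.mk [('0',1),('4',1),('6',1),('8',2),('9',1)] := by decide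
                rw [h]
                simp [Ne.symm h0, Ne.symm h4, Ne.symm h6, Ne.symm h8, Ne.symm h9, PySem.Dict.get?]
              have hw : pvWeight c = 0 := by simp [pvWeight, hnone]
              simp [hw, h0, h4, h6, h8, h9]

theorem sorter_alt_eq (num : String) :
    sorter_alt num =
      (num.toList.count '0' : Int) * 1 + (num.toList.count '4' : Int) * 1 +
      (num.toList.count '6' : Int) * 1 + (num.toList.count '8' : Int) * 2 +
      (num.toList.count '9' : Int) * 1 := by
  unfold sorter_alt sorterTable
  have hc : num.toList.foldl (fun d c => d.insert c (d.getD c 0 + 1)) PySem.Dict.empty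
      = PySem.Dict.counter num.toList :=
    PySem.Dict.foldl_insert_getD_add_one_eq_counter num.toList
  simp only [hc, List.foldl_cons, List.foldl_nil, PySem.Dict.getD_counter]
  ring

-- ===== VERDICT (by name: the statement is the Claim_ definition above) =====
theorem sorter_spec : Claim_equal_sorter := by
  intro num _
  unfold Spec_sorter
  rw [sorter, sorterLoop_eq, weight_sum_eq, sorter_alt_eq]
  ring
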